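-- pv_equiv track=rewrite | github.com/satyam8254/Python-program | python-code/differ.py | differ
-- ===== SOURCE A (Python) =====
-- def differ(arr,n):
--     count=0
--     ans=0
--     positive=[0]*(n+1)
--     negative=[0]*(n+1)
--     positive[0]=1
--     for i in range(n):
--         if arr[i]%2==0:
--             count+=1
--         else:
--             count-=1
--         if count<0:
--             ans+=negative[-count]
--             negative[-count]+=1
--         else:
--             ans+=positive[count]
--             positive[count]+=1
--     return ans
-- ===== SOURCE B (Python) =====
-- def differ(arr, n):
--     # prefix balances (even:+1, odd:-1), then sort and count equal runs
--     bals = [0]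
--     bal = 0
--     for i in range(n):
--         bal += 1 if arr[i] % 2 == 0 else -1
--         bals.append(bal)
--     bals.sort()
--     prev = bals[0]
--     run = 1
--     ans = 0
--     for b in bals[1:]:
--         if b == prev:
--             run += 1
--         else:
--             ans += run * (run - 1) // 2
--             run = 1
--         prev = b
--     return ans + run * (run - 1) // 2
-- ===== Notes on version B (the rewrite author's own statement) =====
-- stated objective: alternative
-- what changed: Replaces A's single-pass pair accumulation into two balance-indexed arrays by sorting the list of prefix balances and counting run*(run-1)//2 for each maximal run of equal values in one linear scan of the sorted list.
import Mathlib
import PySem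

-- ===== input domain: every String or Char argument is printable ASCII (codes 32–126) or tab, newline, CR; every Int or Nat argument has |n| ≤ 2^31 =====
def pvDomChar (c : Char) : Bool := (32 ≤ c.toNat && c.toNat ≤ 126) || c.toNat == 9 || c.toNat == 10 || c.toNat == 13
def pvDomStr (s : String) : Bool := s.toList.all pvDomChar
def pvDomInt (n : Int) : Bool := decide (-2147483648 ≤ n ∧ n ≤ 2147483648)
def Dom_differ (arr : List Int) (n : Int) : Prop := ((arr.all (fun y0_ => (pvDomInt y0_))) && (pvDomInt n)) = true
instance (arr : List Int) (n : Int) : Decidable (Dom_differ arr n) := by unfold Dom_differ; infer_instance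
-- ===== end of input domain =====

-- B replaces A's on-the-fly pair accumulation into two balance-indexed arrays by sorting the
-- prefix-balance list and summing run*(run-1)//2 over maximal runs of equal values (objective: alternative).

-- ===== PORT A =====
-- loop body of A (named so the proofs can speak about one step)
def stepA (st : Int × Int × List Int × List Int) (x : Int) : Int × Int × List Int × List Int :=
  let count := if PySem.Int.mod x 2 = 0 then st.1 + 1 else st.1 - 1
  if count < 0 then
    (count, st.2.1 + PySem.List.pyGetD st.2.2.2 (-count) 0, st.2.2.1,
      PySem.List.pySetD st.2.2.2 (-count) (PySem.List.pyGetD st.2.2.2 (-count) 0 + 1))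
  else
    (count, st.2.1 + PySem.List.pyGetD st.2.2.1 count 0,
      PySem.List.pySetD st.2.2.1 count (PySem.List.pyGetD st.2.2.1 count 0 + 1), st.2.2.2)

def differ (arr : List Int) (n : Int) : Int :=
  let positive : List Int := List.replicate (n + 1).toNat 0
  let negative : List Int := List.replicate (n + 1).toNat 0
  let positive := PySem.List.pySetD positive 0 1
  ((PySem.List.pyRange 0 n 1).foldl
      (fun st i => stepA st (PySem.List.pyGetD arr i 0)) (0, 0, positive, negative)).2.1

-- ===== PORT B =====
-- first loop of B: build the list of prefix balances
def stepB (st : Int × List Int) (x : Int) : Int × List Int :=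
  let bal := st.1 + (if PySem.Int.mod x 2 = 0 then 1 else -1)
  (bal, st.2 ++ [bal])

-- second loop of B: run-length scan over the sorted balances; state (prev, run, ans)
def scanStep (st : Int × Int × Int) (b : Int) : Int × Int × Int :=
  if b = st.1 then (b, st.2.1 + 1, st.2.2)
  else (b, 1, st.2.2 + PySem.Int.floordiv (st.2.1 * (st.2.1 - 1)) 2)

def differ_alt (arr : List Int) (n : Int) : Int :=
  let st := (PySem.List.pyRange 0 n 1).foldl
      (fun st i => stepB st (PySem.List.pyGetD arr i 0)) (0, [0])
  let bals := PySem.List.sorted st.2 (fun x => x) false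
  let fin := (PySem.List.slice bals (some 1) none).foldl scanStep
      (PySem.List.pyGetD bals 0 0, 1, 0)
  fin.2.2 + PySem.Int.floordiv (fin.2.1 * (fin.2.1 - 1)) 2

-- ===== PRECONDITION & SPEC =====
-- A raises IndexError when n < 0 (positive[0] = 1 on an empty list) or n > len(arr) (arr[i]);
-- Pre_ excludes exactly those inputs.
def Pre_differ (arr : List Int) (n : Int) : Prop := 0 ≤ n ∧ n ≤ (arr.length : Int)
instance (arr : List Int) (n : Int) : Decidable (Pre_differ arr n) := by unfold Pre_differ; infer_instance
def pvWitness_differ : List Int × Int := ([2, 3, 5, 4], 4)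

def Spec_differ (arr : List Int) (n : Int) (out : Int) : Prop := out = differ_alt arr n
instance (arr : List Int) (n : Int) (out : Int) : Decidable (Spec_differ arr n out) := by unfold Spec_differ; infer_instance

-- ===== CLAIM (what is proved, stated in full; the proofs are below) =====
def Claim_equal_differ : Prop := ∀ (arr : List Int) (n : Int), Dom_differ arr n → Pre_differ arr n → Spec_differ arr n (differ arr n)

-- ===== LEMMAS AND PROOFS =====

-- the balance update of one element
def pstep (x c : Int) : Int := if PySem.Int.mod x 2 = 0 then c + 1 else c - 1

-- list of running prefix balances starting from balance c
def prefBals : List Int → Int → List Int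
  | [], _ => []
  | x :: t, c => pstep x c :: prefBals t (pstep x c)

-- number of unordered pairs among f equal balances
def comb2 (f : Int) : Int := PySem.Int.floordiv (f * (f - 1)) 2

-- number of unordered pairs of equal elements of a list, by recursion on the distinct values
def SumC : List Int → Int
  | [] => 0
  | x :: t => comb2 (1 + (t.count x : Int)) + SumC (t.filter (fun y => y ≠ x))
termination_by l => l.length
decreasing_by
  simp only [List.length_cons]
  exact Nat.lt_succ_of_le (by simpa using List.length_filter_le _ t.attach)

lemma filter_attach_unattach (t : List Int) (x : Int) :
    (List.filter (fun (y : {y // y ∈ t}) => decide ((y : Int) ≠ x)) t.attach).unattach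
      = t.filter (fun y => decide (y ≠ x)) := by
  rw [List.unattach_filter (g := fun y => decide (y ≠ x)) (hf := fun a h => rfl),
      List.unattach_attach]

lemma comb2_succ (f : Int) : comb2 (f + 1) = comb2 f + f := by
  obtain ⟨k, hk⟩ := Int.even_mul_succ_self (f - 1)
  simp only [comb2, PySem.Int.floordiv_eq_ediv_of_pos (by norm_num : (0:Int) < 2)]
  rw [show (f + 1) * (f + 1 - 1) = k + k + 2 * f by linear_combination hk,
      show f * (f - 1) = k + k by linear_combination hk]
  omega

lemma SumC_append (s : List Int) (b : Int) :
    SumC (s ++ [b]) = SumC s + (s.count b : Int) := by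
  induction s using SumC.induct with
  | case1 => simp [SumC, comb2, PySem.Int.floordiv]
  | case2 x t ih =>
    rw [List.cons_append, SumC, SumC]
    by_cases hb : b = x
    · subst hb
      have hcnt : (((t ++ [b]).count b : Nat) : Int) = (t.count b : Int) + 1 := by
        simp [List.count_append]
      have hfil : (t ++ [b]).filter (fun y => y ≠ b) = t.filter (fun y => y ≠ b) := by
        simp [List.filter_append]
      have hc : (((b :: t).count b : Nat) : Int) = (t.count b : Int) + 1 := by
        simp
      rw [hfil, hcnt, hc,
          show (1 : Int) + ((t.count b : Int) + 1) = (1 + (t.count b : Int)) + 1 from by ring,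
          comb2_succ]
      ring
    · have hxb : x ≠ b := fun h => hb h.symm
      rw [filter_attach_unattach] at ih
      have hx0 : List.count x [b] = 0 := List.count_eq_zero.mpr (by simp [hxb])
      have hcnt : (t ++ [b]).count x = t.count x := by
        simp [List.count_append, hx0]
      have hfil : (t ++ [b]).filter (fun y => y ≠ x) = t.filter (fun y => y ≠ x) ++ [b] := by
        simp [List.filter_append, hb]
      rw [hcnt, hfil, ih]
      have hcb : (t.filter (fun y => y ≠ x)).count b = t.count b := by
        rw [List.count_filter (by simp [hb])]
      have hc2 : ((x :: t).count b : Nat) = t.count b := by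
        simp [hxb]
      rw [hcb, hc2]
      ring

lemma SumC_toFinset (l : List Int) :
    SumC l = ∑ k ∈ l.toFinset, comb2 (l.count k : Int) := by
  induction l using SumC.induct with
  | case1 => simp [SumC]
  | case2 x t ih =>
    rw [filter_attach_unattach] at ih
    rw [SumC, ih]
    have hT : (t.filter (fun y => y ≠ x)).toFinset = t.toFinset.erase x := by
      ext k
      simp [Finset.mem_erase, and_comm]
    have hF : (x :: t).toFinset = insert x (t.toFinset.erase x) := by
      ext k
      by_cases h : k = x <;> simp [h]
    rw [hF, Finset.sum_insert (by simp)]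
    have hcx : ((x :: t).count x : Int) = 1 + (t.count x : Int) := by
      simp
      ring
    rw [hcx, hT]
    congr 1
    apply Finset.sum_congr rfl
    intro k hk
    have hkx : k ≠ x := (Finset.mem_erase.mp hk).1
    have : (t.filter (fun y => y ≠ x)).count k = (x :: t).count k := by
      rw [List.count_filter (by simp [hkx])]
      simp [Ne.symm hkx]
    rw [this]

lemma SumC_perm {l l' : List Int} (h : l.Perm l') : SumC l = SumC l' := by
  rw [SumC_toFinset, SumC_toFinset, List.toFinset_eq_of_perm _ _ h]
  exact Finset.sum_congr rfl (fun k _ => by rw [h.count_eq])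

-- the run-length scan over a sorted list computes SumC
lemma scan_sorted : ∀ (l : List Int) (prev run ans : Int),
    (prev :: l).Pairwise (· ≤ ·) →
    (l.foldl scanStep (prev, run, ans)).2.2 + comb2 (l.foldl scanStep (prev, run, ans)).2.1
      = ans + comb2 (run + (l.count prev : Int)) + SumC (l.filter (fun y => y ≠ prev)) := by
  intro l
  induction l with
  | nil => intro prev run ans _; simp [SumC]
  | cons x t ih =>
    intro prev run ans hp
    have hpx : prev ≤ x := (List.pairwise_cons.mp hp).1 x (by simp)
    have htail : (x :: t).Pairwise (· ≤ ·) := (List.pairwise_cons.mp hp).2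
    rw [List.foldl_cons]
    by_cases hx : x = prev
    · subst hx
      have hs : scanStep (x, run, ans) x = (x, run + 1, ans) := by simp [scanStep]
      rw [hs, ih x (run + 1) ans htail]
      have h1 : ((x :: t).count x : Int) = (t.count x : Int) + 1 := by
        simp
      have h2 : (x :: t).filter (fun y => y ≠ x) = t.filter (fun y => y ≠ x) := by simp
      rw [h1, h2]
      ring_nf
    · have hs : scanStep (prev, run, ans) x
          = (x, 1, ans + PySem.Int.floordiv (run * (run - 1)) 2) := by
        simp [scanStep, hx]
      have hlt : prev < x := lt_of_le_of_ne hpx (fun h => hx h.symm)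
      have hnot : prev ∉ x :: t := by
        intro hm
        rcases List.mem_cons.mp hm with h | h
        · exact absurd h.symm hx
        · exact absurd ((List.pairwise_cons.mp htail).1 prev h) (not_le.mpr hlt)
      have hc0 : (x :: t).count prev = 0 := List.count_eq_zero.mpr hnot
      have hfil : (x :: t).filter (fun y => y ≠ prev) = x :: t := by
        rw [List.filter_eq_self]
        intro a ha
        simp only [ne_eq, decide_eq_true_eq]
        intro h; subst h; exact hnot ha
      rw [hs, ih x 1 (ans + PySem.Int.floordiv (run * (run - 1)) 2) htail, hfil, hc0, SumC]
      simp only [comb2]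
      push_cast
      ring_nf

-- reduce a fold over range(n) reading arr[i] to a fold over the first n elements
lemma fold_range_take {β : Type} (arr : List Int) (n : Int) (h0 : 0 ≤ n)
    (hl : n ≤ (arr.length : Int)) (f : β → Int → β) (init : β) :
    (PySem.List.pyRange 0 n 1).foldl (fun acc j => f acc (PySem.List.pyGetD arr j 0)) init
      = (arr.take n.toNat).foldl f init := by
  have hcongr : ∀ (acc : β), ∀ j ∈ PySem.List.pyRange 0 n 1,
      f acc (PySem.List.pyGetD arr j 0) = f acc (PySem.List.pyGetD (arr.take n.toNat) j 0) := by
    intro acc j hj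
    obtain ⟨hj0, hjn⟩ := (PySem.List.mem_pyRange_one).mp hj
    have h2 : j.toNat < arr.length := by omega
    have h3 : j.toNat < (arr.take n.toNat).length := by
      simp only [List.length_take]; omega
    rw [PySem.List.pyGetD_eq_getElem arr 0 hj0 (by omega),
        PySem.List.pyGetD_eq_getElem (arr.take n.toNat) 0 hj0 (by simp only [List.length_take]; omega),
        List.getElem_take]
  rw [PySem.List.foldl_congr_mem _ _ _ init hcongr,
      ← PySem.List.foldl_pyRange_zero_pyGetD' (arr.take n.toNat) 0 f init]
  congr 2
  simp only [List.length_take]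
  omega

-- B's first loop appends exactly the prefix balances
lemma Bbuild (ys : List Int) : ∀ (c : Int) (acc : List Int),
    (ys.foldl stepB (c, acc)).2 = acc ++ prefBals ys c := by
  induction ys with
  | nil => intro c acc; simp [prefBals]
  | cons x t ih =>
    intro c acc
    have hb : stepB (c, acc) x = (pstep x c, acc ++ [pstep x c]) := by
      by_cases h : PySem.Int.mod x 2 = 0
      · simp only [stepB, pstep, if_pos h]
      · simp only [stepB, pstep, if_neg h, sub_eq_add_neg]
    rw [List.foldl_cons, hb, ih, show prefBals (x :: t) c = pstep x c :: prefBals t (pstep x c) from rfl]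
    simp

lemma stepA_eq (c ans : Int) (pos neg : List Int) (x : Int) :
    stepA (c, ans, pos, neg) x =
      if pstep x c < 0 then
        (pstep x c, ans + PySem.List.pyGetD neg (-(pstep x c)) 0, pos,
          PySem.List.pySetD neg (-(pstep x c)) (PySem.List.pyGetD neg (-(pstep x c)) 0 + 1))
      else
        (pstep x c, ans + PySem.List.pyGetD pos (pstep x c) 0,
          PySem.List.pySetD pos (pstep x c) (PySem.List.pyGetD pos (pstep x c) 0 + 1), neg) := rfl

lemma pstep_natAbs (x c : Int) : (pstep x c).natAbs ≤ c.natAbs + 1 := by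
  unfold pstep; split_ifs <;> omega

lemma count_append_singleton_ne (s : List Int) (b b0 : Int) (h : b0 ≠ b) :
    (s ++ [b]).count b0 = s.count b0 := by
  rw [List.count_append]; simp [Ne.symm h]

lemma count_append_singleton_self (s : List Int) (b : Int) :
    (s ++ [b]).count b = s.count b + 1 := by
  rw [List.count_append]; simp

lemma Aloop (N : Nat) (ys : List Int) : ∀ (seen : List Int) (c ans : Int) (pos neg : List Int),
    pos.length = N + 1 → neg.length = N + 1 →
    c.natAbs + ys.length ≤ N →
    (∀ b : Int, 0 ≤ b → b ≤ (N : Int) → PySem.List.pyGetD pos b 0 = (seen.count b : Int)) →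
    (∀ b : Int, -(N : Int) ≤ b → b < 0 → PySem.List.pyGetD neg (-b) 0 = (seen.count b : Int)) →
    ans = SumC seen →
    (ys.foldl stepA (c, ans, pos, neg)).2.1 = SumC (seen ++ prefBals ys c) := by
  induction ys with
  | nil =>
    intro seen c ans pos neg _ _ _ _ _ hans
    simpa [prefBals] using hans
  | cons x t ih =>
    intro seen c ans pos neg hpos hneg hbound hP hN hans
    rw [List.foldl_cons, stepA_eq]
    have hstep := pstep_natAbs x c
    have hbound' : (pstep x c).natAbs + t.length ≤ N := by
      simp only [List.length_cons] at hbound; omega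
    have hca : seen ++ prefBals (x :: t) c = (seen ++ [pstep x c]) ++ prefBals t (pstep x c) := by
      simp [prefBals]
    rw [hca]
    by_cases hcase : pstep x c < 0
    · rw [if_pos hcase]
      have hget : PySem.List.pyGetD neg (-(pstep x c)) 0 = (seen.count (pstep x c) : Int) :=
        hN _ (by omega) hcase
      apply ih (seen ++ [pstep x c])
      · exact hpos
      · rw [PySem.List.length_pySetD, hneg]
      · exact hbound'
      · intro b0 h0 h1
        rw [count_append_singleton_ne seen _ b0 (by omega)]
        exact hP b0 h0 h1
      · intro b0 h0 h1
        have hm : (-(pstep x c)) = ((((-(pstep x c)).toNat : Nat)) : Int) := by omega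
        have hm0 : (-b0) = ((((-b0).toNat : Nat)) : Int) := by omega
        rw [hm0, hm, PySem.List.pyGetD_pySetD_natCast neg _ _ _ _ (by omega)]
        by_cases he : (-b0).toNat = (-(pstep x c)).toNat
        · have hb0 : b0 = pstep x c := by omega
          rw [if_pos he, hb0, count_append_singleton_self, ← hm, hget]
          push_cast; ring
        · rw [if_neg he, ← hm0, count_append_singleton_ne seen _ b0 (by omega),
              hN b0 h0 h1]
      · rw [hget, hans, SumC_append]
    · rw [if_neg hcase]
      rw [not_lt] at hcase
      have hget : PySem.List.pyGetD pos (pstep x c) 0 = (seen.count (pstep x c) : Int) :=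
        hP _ hcase (by omega)
      apply ih (seen ++ [pstep x c])
      · rw [PySem.List.length_pySetD, hpos]
      · exact hneg
      · exact hbound'
      · intro b0 h0 h1
        have hm : (pstep x c) = ((((pstep x c).toNat : Nat)) : Int) := by omega
        have hm0 : b0 = (((b0.toNat : Nat)) : Int) := by omega
        rw [hm0, hm, PySem.List.pyGetD_pySetD_natCast pos _ _ _ _ (by omega)]
        by_cases he : b0.toNat = (pstep x c).toNat
        · have hb0 : b0 = pstep x c := by omega
          rw [if_pos he, hb0, count_append_singleton_self, ← hm, hget]
          push_cast; ring
        · rw [if_neg he, ← hm0, count_append_singleton_ne seen _ b0 (by omega),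
              hP b0 h0 h1]
      · intro b0 h0 h1
        rw [count_append_singleton_ne seen _ b0 (by omega)]
        exact hN b0 h0 h1
      · rw [hget, hans, SumC_append]

-- B equals SumC of the prefix-balance list (with the leading 0)
lemma B_eq_SumC (arr : List Int) (n : Int) (h0 : 0 ≤ n) (hl : n ≤ (arr.length : Int)) :
    differ_alt arr n = SumC (0 :: prefBals (arr.take n.toNat) 0) := by
  simp only [differ_alt]
  rw [fold_range_take arr n h0 hl stepB _, Bbuild]
  set bals0 : List Int := 0 :: prefBals (arr.take n.toNat) 0 with hbals0
  have hne : PySem.List.sorted bals0 (fun x => x) false ≠ [] := by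
    rw [Ne, PySem.List.sorted_eq_nil_iff]
    simp [hbals0]
  obtain ⟨h, t, hs⟩ : ∃ h t, PySem.List.sorted bals0 (fun x => x) false = h :: t := by
    cases hsx : PySem.List.sorted bals0 (fun x => x) false with
    | nil => exact absurd hsx hne
    | cons h t => exact ⟨h, t, rfl⟩
  have hperm : (h :: t).Perm bals0 := hs ▸ PySem.List.sorted_perm bals0 (fun x => x) false
  have hpw : (h :: t).Pairwise (· ≤ ·) := by
    have hpw0 := PySem.List.sorted_pairwise bals0 (fun x => x)
    rw [hs] at hpw0
    simpa using hpw0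
  rw [List.singleton_append, hs, PySem.List.slice_from_one, PySem.List.pyGetD_zero_cons]
  have := scan_sorted t h 1 0 hpw
  simp only [List.tail_cons]
  calc (t.foldl scanStep (h, 1, 0)).2.2
        + PySem.Int.floordiv ((t.foldl scanStep (h, 1, 0)).2.1 * ((t.foldl scanStep (h, 1, 0)).2.1 - 1)) 2
      = (t.foldl scanStep (h, 1, 0)).2.2 + comb2 (t.foldl scanStep (h, 1, 0)).2.1 := rfl
    _ = 0 + comb2 (1 + (t.count h : Int)) + SumC (t.filter (fun y => y ≠ h)) := this
    _ = SumC (h :: t) := by rw [SumC]; ring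
    _ = SumC bals0 := SumC_perm hperm

-- ===== VERDICT (by name: the statement is the Claim_ definition above) =====
theorem differ_spec : Claim_equal_differ := by
  intro arr n _ hpre
  obtain ⟨h0, hl⟩ := hpre
  unfold Spec_differ
  rw [B_eq_SumC arr n h0 hl]
  simp only [differ]
  rw [fold_range_take arr n h0 hl stepA _]
  have hrep : (n + 1).toNat = n.toNat + 1 := by omega
  have hmain := Aloop n.toNat (arr.take n.toNat) [0] 0 0
    (PySem.List.pySetD (List.replicate (n + 1).toNat 0) 0 1) (List.replicate (n + 1).toNat 0)
    (by rw [PySem.List.length_pySetD, List.length_replicate, hrep])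
    (by rw [List.length_replicate, hrep])
    (by simp only [Int.natAbs_zero, List.length_take, Nat.zero_add]; omega)
    (by
      intro b0 hb0 hb1
      have hm0 : b0 = (((b0.toNat : Nat)) : Int) := by omega
      rw [hm0, show (0:Int) = (((0:Nat)) : Int) from rfl,
          PySem.List.pyGetD_pySetD_natCast _ _ _ _ _ (by rw [List.length_replicate, hrep]; omega)]
      by_cases he : b0.toNat = 0
      · have : b0 = 0 := by omega
        rw [if_pos he, this]; simp
      · have hne : b0 ≠ 0 := by omega
        rw [if_neg he,
            PySem.List.pyGetD_eq_getElem _ _ (by omega)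
              (by rw [List.length_replicate, hrep]; omega)]
        simp [List.count_cons]
        omega
    )
    (by
      intro b0 hb0 hb1
      have hne : b0 ≠ 0 := by omega
      rw [PySem.List.pyGetD_eq_getElem _ _ (by omega)
            (by rw [List.length_replicate, hrep]; omega)]
      simp [Ne.symm hne]
    )
    (by simp [SumC, comb2])
  rw [hmain]
  simp
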